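-- pv_equiv track=rewrite | github.com/NoteXYX/myCNN_RNN_attention | tools.py | getKeyphraseList
-- ===== SOURCE A (Python) =====
-- def getKeyphraseList(l):
--     res, now= [], []
--     singleKW = []
--     moreKP = []
--     for i in range(len(l)):
--         if l[i] != 0:
--             now.append(str(i))
--         if l[i] == 0 or i == len(l) - 1:
--             if len(now) != 0:
--                 res.append(' '.join(now))
--                 if len(now) == 1:
--                     singleKW.append(now[0])
--                 else:
--                     moreKP.append(' '.join(now))
--             now = []
--     return set(res), set(singleKW), set(moreKP)
-- ===== SOURCE B (Python) =====
-- def getKeyphraseList(l):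
--     res, singleKW, moreKP = [], [], []
--     n = len(l)
--     i = 0
--     while i < n:
--         if l[i] == 0:
--             i += 1
--         else:
--             j = i
--             while j < n and l[j] != 0:
--                 j += 1
--             s = ' '.join(str(k) for k in range(i, j))
--             res.append(s)
--             if j - i == 1:
--                 singleKW.append(s)
--             else:
--                 moreKP.append(s)
--             i = j
--     return set(res), set(singleKW), set(moreKP)
-- ===== Notes on version B (the rewrite author's own statement) =====
-- stated objective: alternative
-- what changed: B scans maximal nonzero runs with a two-pointer while loop and builds each keyphrase string directly from range(i, j), replacing A's per-element 'now' accumulator with its flush-at-zero-or-last-element sentinel logic.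
import Mathlib
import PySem

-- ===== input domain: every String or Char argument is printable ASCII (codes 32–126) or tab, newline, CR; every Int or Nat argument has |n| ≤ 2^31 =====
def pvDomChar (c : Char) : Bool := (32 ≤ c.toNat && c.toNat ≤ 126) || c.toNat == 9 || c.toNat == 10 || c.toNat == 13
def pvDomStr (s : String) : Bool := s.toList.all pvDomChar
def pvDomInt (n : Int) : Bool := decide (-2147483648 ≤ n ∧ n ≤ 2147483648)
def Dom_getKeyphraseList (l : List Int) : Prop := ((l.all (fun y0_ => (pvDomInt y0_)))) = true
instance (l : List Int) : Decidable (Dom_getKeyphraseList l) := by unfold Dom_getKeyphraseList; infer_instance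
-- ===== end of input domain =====

-- B scans maximal nonzero runs with a two-pointer loop, building each keyphrase from the run bounds;
-- A accumulates index strings one element at a time and flushes at zeros / the last element (alternative, same cost).

-- ===== PORT A =====
-- one loop step of A: state (res, now, singleKW, moreKP), element value x = l[i]
def aStep (n : Int) (st : List String × List String × List String × List String) (i x : Int) :
    List String × List String × List String × List String :=
  let res := st.1
  let now := st.2.1
  let sg := st.2.2.1
  let mp := st.2.2.2
  let now := if x ≠ 0 then now ++ [PySem.Int.toStr i] else now
  if x = 0 ∨ i = n - 1 then
    if now.length ≠ 0 then
      ( res ++ [PySem.Str.join " " now],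
        ([] : List String),
        (if now.length = 1 then sg ++ [now.getD 0 ""] else sg),
        (if now.length = 1 then mp else mp ++ [PySem.Str.join " " now]) )
    else (res, [], sg, mp)
  else (res, now, sg, mp)

def getKeyphraseList (l : List Int) : List String × List String × List String :=
  let n : Int := (l.length : Int)
  let st := (PySem.List.pyRange 0 n 1).foldl
    (fun st i => aStep n st i (PySem.List.pyGetD l i 0)) ([], [], [], [])
  (PySem.Set.ofList st.1, PySem.Set.ofList st.2.2.1, PySem.Set.ofList st.2.2.2)

-- ===== PORT B =====
-- inner while loop: number of leading nonzero elements (j - i)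
def altRunLen : List Int → Nat
  | [] => 0
  | x :: t => if x = 0 then 0 else altRunLen t + 1

-- outer while loop over the remaining suffix, carrying the absolute index i
def altGo : List Int → Int → (List String × List String × List String) → (List String × List String × List String)
  | [], _, acc => acc
  | x :: t, i, (res, sg, mp) =>
    if x = 0 then altGo t (i + 1) (res, sg, mp)
    else
      let k := altRunLen (x :: t)
      let s := PySem.Str.join " " ((PySem.List.pyRange i (i + (k : Int)) 1).map PySem.Int.toStr)
      altGo (t.drop (k - 1)) (i + (k : Int))
        (res ++ [s], if k = 1 then sg ++ [s] else sg, if k = 1 then mp else mp ++ [s])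
  termination_by xs => xs.length
  decreasing_by
    · simp
    · simp [List.length_drop]

def getKeyphraseList_alt (l : List Int) : List String × List String × List String :=
  let (r, s, m) := altGo l 0 ([], [], [])
  (PySem.Set.ofList r, PySem.Set.ofList s, PySem.Set.ofList m)

-- ===== PRECONDITION & SPEC =====
def Spec_getKeyphraseList (l : List Int) (out : List String × List String × List String) : Prop := out = getKeyphraseList_alt l
instance (l : List Int) (out : List String × List String × List String) : Decidable (Spec_getKeyphraseList l out) := by unfold Spec_getKeyphraseList; infer_instance

-- ===== CLAIM (what is proved, stated in full; the proofs are below) =====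
def Claim_equal_getKeyphraseList : Prop := ∀ (l : List Int), Dom_getKeyphraseList l → Spec_getKeyphraseList l (getKeyphraseList l)

-- ===== LEMMAS AND PROOFS =====

-- the state A's fold produces when it flushes a nonempty accumulator `now`
def flushSt (res now sg mp : List String) : List String × List String × List String × List String :=
  ( res ++ [PySem.Str.join " " now], [],
    if now.length = 1 then sg ++ [now.getD 0 ""] else sg,
    if now.length = 1 then mp else mp ++ [PySem.Str.join " " now] )

theorem altRunLen_le (xs : List Int) : altRunLen xs ≤ xs.length := by
  induction xs with
  | nil => simp [altRunLen]
  | cons x t ih =>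
    by_cases hx : x = 0
    · simp [altRunLen, hx]
    · simp [altRunLen, hx]; omega

theorem altRunLen_pos (x : Int) (t : List Int) (hx : x ≠ 0) : altRunLen (x :: t) = altRunLen t + 1 := by
  simp [altRunLen, hx]

theorem altRunLen_stop (xs : List Int) (h : altRunLen xs < xs.length) : xs.getD (altRunLen xs) 0 = 0 := by
  induction xs with
  | nil => simp at h
  | cons x t ih =>
    by_cases hx : x = 0
    · simp [altRunLen, hx]
    · rw [altRunLen_pos x t hx] at h ⊢
      simpa using ih (by simpa using h)

theorem str_join_single (s : String) : PySem.Str.join " " [s] = s := by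
  simp [PySem.Str.join]

-- A's fold through one maximal nonzero run (and through the zero that ends it, if any)
theorem run_lemma (n : Int) (xs : List Int) : ∀ (i : Int) (now res sg mp : List String),
    i + xs.length = n → xs ≠ [] → xs.getD 0 0 ≠ 0 →
    (PySem.List.enumerate xs i).foldl (fun st p => aStep n st p.1 p.2) (res, now, sg, mp) =
      (if altRunLen xs < xs.length
       then (PySem.List.enumerate (xs.drop (altRunLen xs + 1)) (i + (altRunLen xs : Int) + 1)).foldl
              (fun st p => aStep n st p.1 p.2)
              (flushSt res (now ++ (PySem.List.pyRange i (i + (altRunLen xs : Int)) 1).map PySem.Int.toStr) sg mp)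
       else flushSt res (now ++ (PySem.List.pyRange i (i + (altRunLen xs : Int)) 1).map PySem.Int.toStr) sg mp) := by
  induction xs with
  | nil => intro i now res sg mp _ hne _; exact absurd rfl hne
  | cons x t ih =>
    intro i now res sg mp hn _ hx0
    have hx : x ≠ 0 := by simpa using hx0
    have hk : altRunLen (x :: t) = altRunLen t + 1 := altRunLen_pos x t hx
    rw [PySem.List.enumerate_cons, List.foldl_cons]
    cases t with
    | nil =>
      have hi : i = n - 1 := by simp at hn; omega
      have hst : aStep n (res, now, sg, mp) i x = flushSt res (now ++ [PySem.Int.toStr i]) sg mp := by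
        simp [aStep, hx, hi, flushSt]
      simp only [altRunLen, hx] at *
      rw [hst]
      simp [PySem.List.enumerate_nil, PySem.List.pyRange_one_singleton]
    | cons y t' =>
      have hlen : ((x :: y :: t').length : Int) = 2 + t'.length := by push_cast [List.length]; ring
      have hi : ¬ (i = n - 1) := by
        intro h; rw [hlen] at hn; omega
      have hst : aStep n (res, now, sg, mp) i x = (res, now ++ [PySem.Int.toStr i], sg, mp) := by
        simp [aStep, hx, hi]
      rw [hst]
      by_cases hy : y = 0
      · -- the run has length 1; the zero right after flushes
        have hkt : altRunLen (y :: t') = 0 := by simp [altRunLen, hy]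
        rw [PySem.List.enumerate_cons, List.foldl_cons]
        have hst2 : aStep n (res, now ++ [PySem.Int.toStr i], sg, mp) (i+1) y =
            flushSt res (now ++ [PySem.Int.toStr i]) sg mp := by
          simp [aStep, hy, flushSt]
        rw [hst2]
        rw [hk, hkt]
        have hlt : 0 + 1 < (x :: y :: t').length := by simp
        rw [if_pos hlt]
        simp [PySem.List.pyRange_one_singleton]
      · -- the run continues with y
        have ihy := ih (i+1) (now ++ [PySem.Int.toStr i]) res sg mp
          (by rw [hlen] at hn; push_cast [List.length]; omega) (by simp) (by simpa using hy)
        rw [ihy, hk]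
        have hrange : PySem.List.pyRange i (i + ((altRunLen (y :: t') + 1 : Nat) : Int)) 1 =
            i :: PySem.List.pyRange (i+1) ((i+1) + ((altRunLen (y :: t') : Nat) : Int)) 1 := by
          rw [PySem.List.pyRange_one_cons (by push_cast; omega)]
          congr 1
          push_cast
          ring_nf
        have hidx : (i+1) + ((altRunLen (y :: t') : Nat) : Int) + 1 = i + ((altRunLen (y :: t') + 1 : Nat) : Int) + 1 := by
          push_cast; ring
        have hcond : (altRunLen (y :: t') < (y :: t').length) ↔ (altRunLen (y :: t') + 1 < (x :: y :: t').length) := by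
          simp
        rw [hrange]
        simp only [List.map_cons, hidx, hcond, List.drop_succ_cons, List.append_assoc, List.singleton_append]

-- A's whole fold equals B's run loop (with A's `now` empty at every run boundary)
theorem main_lemma (n : Int) : ∀ (N : Nat) (xs : List Int), xs.length ≤ N →
    ∀ (i : Int) (res sg mp : List String), i + xs.length = n →
    (PySem.List.enumerate xs i).foldl (fun st p => aStep n st p.1 p.2) (res, [], sg, mp) =
      ((altGo xs i (res, sg, mp)).1, [], (altGo xs i (res, sg, mp)).2.1, (altGo xs i (res, sg, mp)).2.2) := by
  intro N
  induction N with
  | zero =>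
    intro xs hN i res sg mp hn
    have : xs = [] := by simpa using List.length_eq_zero_iff.mp (Nat.le_zero.mp hN)
    subst this
    simp [PySem.List.enumerate_nil, altGo]
  | succ N ihN =>
    intro xs hN i res sg mp hn
    cases hxs : xs with
    | nil => simp [PySem.List.enumerate_nil, altGo]
    | cons x t =>
      subst hxs
      by_cases hx : x = 0
      · rw [PySem.List.enumerate_cons, List.foldl_cons]
        have hst : aStep n (res, [], sg, mp) i x = (res, [], sg, mp) := by
          simp [aStep, hx]
        rw [hst]
        have := ihN t (by simpa using Nat.lt_succ_iff.mp (Nat.lt_of_lt_of_le (by simp) hN))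
          (i+1) res sg mp (by push_cast [List.length] at hn ⊢; omega)
        rw [this]
        simp [altGo, hx]
      · -- a nonzero run starts here
        have hk1 : 1 ≤ altRunLen (x :: t) := by rw [altRunLen_pos x t hx]; omega
        have hkle : altRunLen (x :: t) ≤ (x :: t).length := altRunLen_le (x :: t)
        have hrl := run_lemma n (x :: t) i [] res sg mp hn (by simp) (by simpa using hx)
        rw [hrl]
        have hrlen : ((PySem.List.pyRange i (i + (altRunLen (x :: t) : Int)) 1).map PySem.Int.toStr).length
            = altRunLen (x :: t) := by
          rw [List.length_map, PySem.List.length_pyRange_one]; omega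
        have hflush : flushSt res ([] ++ (PySem.List.pyRange i (i + (altRunLen (x :: t) : Int)) 1).map PySem.Int.toStr) sg mp =
            ( res ++ [PySem.Str.join " " ((PySem.List.pyRange i (i + (altRunLen (x :: t) : Int)) 1).map PySem.Int.toStr)],
              [],
              if altRunLen (x :: t) = 1 then sg ++ [PySem.Str.join " " ((PySem.List.pyRange i (i + (altRunLen (x :: t) : Int)) 1).map PySem.Int.toStr)] else sg,
              if altRunLen (x :: t) = 1 then mp else mp ++ [PySem.Str.join " " ((PySem.List.pyRange i (i + (altRunLen (x :: t) : Int)) 1).map PySem.Int.toStr)] ) := by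
          unfold flushSt
          rw [List.nil_append, hrlen]
          by_cases hkk : altRunLen (x :: t) = 1
          · simp only [hkk]
            simp [PySem.List.pyRange_one_singleton, str_join_single]
          · simp [hkk]
        have haltgo : altGo (x :: t) i (res, sg, mp) =
            altGo (t.drop (altRunLen (x :: t) - 1)) (i + (altRunLen (x :: t) : Int))
              ( res ++ [PySem.Str.join " " ((PySem.List.pyRange i (i + (altRunLen (x :: t) : Int)) 1).map PySem.Int.toStr)],
                if altRunLen (x :: t) = 1 then sg ++ [PySem.Str.join " " ((PySem.List.pyRange i (i + (altRunLen (x :: t) : Int)) 1).map PySem.Int.toStr)] else sg,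
                if altRunLen (x :: t) = 1 then mp else mp ++ [PySem.Str.join " " ((PySem.List.pyRange i (i + (altRunLen (x :: t) : Int)) 1).map PySem.Int.toStr)] ) := by
          conv_lhs => rw [altGo]
          simp [hx]
        rw [hflush, haltgo]
        by_cases hlt : altRunLen (x :: t) < (x :: t).length
        · rw [if_pos hlt]
          have hdropt : t.drop (altRunLen (x :: t) - 1) = (0 : Int) :: (x :: t).drop (altRunLen (x :: t) + 1) := by
            obtain ⟨m, hm⟩ : ∃ m, altRunLen (x :: t) = m + 1 := ⟨altRunLen (x :: t) - 1, by omega⟩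
            have hmlt : m < t.length := by simp only [List.length_cons] at hlt; omega
            rw [hm]
            simp only [Nat.add_sub_cancel, List.drop_succ_cons]
            rw [List.drop_eq_getElem_cons hmlt]
            have hz : t[m] = 0 := by
              have h0 := altRunLen_stop (x :: t) hlt
              rw [hm] at h0
              simp only [List.getD_cons_succ] at h0
              rw [List.getD_eq_getElem t 0 hmlt] at h0
              exact h0
            rw [hz]
          rw [hdropt]
          have haltskip : ∀ (acc : List String × List String × List String),
              altGo ((0 : Int) :: (x :: t).drop (altRunLen (x :: t) + 1)) (i + (altRunLen (x :: t) : Int)) acc =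
              altGo ((x :: t).drop (altRunLen (x :: t) + 1)) (i + (altRunLen (x :: t) : Int) + 1) acc := by
            intro acc
            obtain ⟨a, b, c⟩ := acc
            rw [altGo]
            simp
          rw [haltskip]
          exact ihN ((x :: t).drop (altRunLen (x :: t) + 1))
            (by simp only [List.length_drop, List.length_cons] at *; omega)
            (i + (altRunLen (x :: t) : Int) + 1) _ _ _
            (by simp only [List.length_drop, List.length_cons] at *; push_cast at hn ⊢; omega)
        · rw [if_neg hlt]
          have hdrop : t.drop (altRunLen (x :: t) - 1) = [] := by
            rw [List.drop_eq_nil_iff]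
            simp only [List.length_cons] at hkle hlt
            omega
          rw [hdrop, altGo]

-- ===== VERDICT (by name: the statement is the Claim_ definition above) =====
theorem getKeyphraseList_spec : Claim_equal_getKeyphraseList := by
  intro l _
  unfold Spec_getKeyphraseList getKeyphraseList getKeyphraseList_alt
  have henum : PySem.List.enumerate l 0 =
      (PySem.List.pyRange 0 (l.length : Int) 1).map (fun j => (j, PySem.List.pyGetD l j 0)) := by
    have := PySem.List.enumerate_eq_map_pyRange l (0 : Int)
    simpa using this
  have hfold : (PySem.List.pyRange 0 (l.length : Int) 1).foldl
      (fun st i => aStep (l.length : Int) st i (PySem.List.pyGetD l i 0)) ([], [], [], []) =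
      (PySem.List.enumerate l 0).foldl (fun st p => aStep (l.length : Int) st p.1 p.2) ([], [], [], []) := by
    rw [henum, List.foldl_map]
  simp only [hfold]
  rw [main_lemma (l.length : Int) l.length l (le_refl _) 0 [] [] [] (by simp)]
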